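-- pv_equiv track=rewrite | github.com/cizins/2026-python | weeks/week-07/solutions/1114405042/solution_10093-easy.py | solve_easy
-- ===== SOURCE A (Python) =====
-- from functools import lru_cache
--
-- def solve_easy(n: int, m: int, grid: list[str]) -> int:
--     """
--     計算最多能部署的炮兵數量 (簡易版：使用 DFS + lru_cache)。
--     """
--     if n == 0 or m == 0:
--         return 0
--
--     # 步驟 1: 將地圖轉換為整數的位元遮罩，1 代表山地 (不能放置)，0 代表平原
--     mountains = []
--     for row in grid:
--         mask = 0
--         for i, char in enumerate(row):
--             if char == 'H':
--                 mask |= (1 << i)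
--         mountains.append(mask)
--
--     # 步驟 2: 預先找出單行所有「自身不會互相攻擊」的合法放置狀態
--     valid_states = []
--     for i in range(1 << m):
--         if (i & (i << 1)) == 0 and (i & (i << 2)) == 0:
--             valid_states.append(i)
--
--     # 步驟 3: 定義遞迴函數
--     # 參數 r: 當前列數 (0 到 n-1)
--     # 參數 st1: 上一列的狀態
--     # 參數 st2: 上上列的狀態
--     @lru_cache(None)  # None 代表快取沒有上限
--     def dfs(r, st1, st2):
--         # 如果已經超過最後一列，沒辦法再放了，回傳 0
--         if r == n:
--             return 0
--
--         max_artillery = 0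
--
--         # 嘗試在第 r 列放入各種預先算好的合法狀態
--         for curr_st in valid_states:
--             # 檢查 1: 是否與地形衝突 (不能放在山地)
--             if curr_st & mountains[r]:
--                 continue
--             # 檢查 2: 是否與上一列 (st1) 發生縱向衝突
--             if curr_st & st1:
--                 continue
--             # 檢查 3: 是否與上上列 (st2) 發生縱向衝突
--             if curr_st & st2:
--                 continue
--
--             # 計算當前這個狀態放了幾個炮兵 (二進位裡面 1 的個數)
--             count = bin(curr_st).count('1')
--
--             # 繼續往下決定下一列 (原本的 curr_st 變成了上一列，原本的 st1 變成了上上列)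
--             max_artillery = max(max_artillery, count + dfs(r + 1, curr_st, st1))
--
--         return max_artillery
--
--     # 一開始在第 0 列，且沒有上一列和上上列的狀態，所以初始狀態填 0
--     return dfs(0, 0, 0)
-- ===== SOURCE B (Python) =====
-- def solve_easy(n: int, m: int, grid: list[str]) -> int:
--     if n == 0 or m == 0:
--         return 0
--     mountains = [sum(1 << i for i, ch in enumerate(row) if ch == 'H')
--                  for row in grid[:n]]
--     states = [s for s in range(1 << m)
--               if not (s & (s << 1)) and not (s & (s << 2))]
--     # f[pp][k] = best artillery count for the rows already processed (a suffix of the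
--     # grid), given that the row directly above them has state states[k] and the row
--     # above that one has state pp
--     f = {pp: [0] * len(states) for pp in states}
--     for mask in reversed(mountains):
--         f = {pp: [max(bin(c).count('1') + fc
--                       for c, fc in zip(states, f[p])
--                       if not (c & mask or c & p or c & pp))
--                   for p in states]
--              for pp in states}
--     return f[0][0]
-- ===== Notes on version B (the rewrite author's own statement) =====
-- stated objective: alternative
-- what changed: Replaces the memoized top-down DFS (lru_cache recursion over rows) with an explicit bottom-up tabulation: a dict over all (prev, prevprev) state pairs is rebuilt per row, sweeping the rows from last to first, and the answer is read at (0, 0).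
import Mathlib
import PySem

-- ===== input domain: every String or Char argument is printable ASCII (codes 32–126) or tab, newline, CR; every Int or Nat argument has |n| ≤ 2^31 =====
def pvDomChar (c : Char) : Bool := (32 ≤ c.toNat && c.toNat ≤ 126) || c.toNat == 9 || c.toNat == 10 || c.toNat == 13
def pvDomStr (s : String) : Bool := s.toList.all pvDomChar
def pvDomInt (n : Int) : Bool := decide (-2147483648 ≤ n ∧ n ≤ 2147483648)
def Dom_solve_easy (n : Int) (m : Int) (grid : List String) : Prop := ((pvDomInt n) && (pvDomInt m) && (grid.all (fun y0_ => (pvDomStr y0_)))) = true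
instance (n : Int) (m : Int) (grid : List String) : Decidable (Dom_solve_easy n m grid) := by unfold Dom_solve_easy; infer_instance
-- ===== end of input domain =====

-- B replaces A's memoized top-down DFS by an explicit bottom-up tabulation over
-- (prevprev state, prev state) keyed per-row tables, sweeping the rows from last to
-- first (objective: alternative).

-- ===== PORT A =====
-- mask |= 1 << i for the 'H' positions of a row (masks are nonnegative, so Nat is exact)
def rowMaskA (row : String) : Nat :=
  (PySem.List.enumerate row.toList 0).foldl
    (fun mask ic => if ic.2 = 'H' then mask ||| (1 <<< ic.1.toNat) else mask) 0
    -- ic.1 is the enumerate index, always ≥ 0, so .toNat is exact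

-- the single-row states of range(1 << m) with no self-attack (exact for m ≥ 0; Python raises for m < 0)
def validStatesA (m : Nat) : List Nat :=
  (List.range (2 ^ m)).filter (fun s => s &&& (s <<< 1) == 0 && s &&& (s <<< 2) == 0)

-- dfs(r, st1, st2) with its @lru_cache, recursing on the list of remaining mountain-mask
-- rows (rows = mountains[r:n], so 'r == n' is rows = [] and r is determined by rows.length,
-- which keys the cache exactly as Python's r does); the cache is the threaded HashMap
-- (Python's lru_cache(None) is an unbounded hash table); bin(c).count('1') is
-- PySem.Int.bitCount
def dfsM (valid : List Nat) :
    (rows : List Nat) → Nat → Nat → Std.HashMap (Nat × Nat × Nat) Int →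
    Int × Std.HashMap (Nat × Nat × Nat) Int
  | rows, st1, st2, memo =>
    match memo[(rows.length, st1, st2)]? with
    | some v => (v, memo)
    | none =>
      match rows with
      | [] => (0, memo.insert (rows.length, st1, st2) 0)
      | mrow :: rest =>
        let res := valid.foldl
          (fun (acc : Int × Std.HashMap (Nat × Nat × Nat) Int) cur =>
            if cur &&& mrow ≠ 0 then acc
            else if cur &&& st1 ≠ 0 then acc
            else if cur &&& st2 ≠ 0 then acc
            else
              let q := dfsM valid rest cur st1 acc.2
              (max acc.1 ((PySem.Int.bitCount (cur : Int) : Int) + q.1), q.2))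
          (0, memo)
        (res.1, res.2.insert (rows.length, st1, st2) res.1)
termination_by rows => rows.length
decreasing_by simp

def solve_easy (n : Int) (m : Int) (grid : List String) : Int :=
  if n = 0 ∨ m = 0 then 0
  else
    -- dfs reads exactly mountains[0..n-1]; exact for n ≤ len(grid) (Pre_; Python raises IndexError above)
    (dfsM (validStatesA m.toNat) ((grid.map rowMaskA).take n.toNat) 0 0 ∅).1

-- ===== PORT B =====
-- sum(1 << i for i, ch in enumerate(row) if ch == 'H')
def rowMaskB (row : String) : Nat :=
  ((((PySem.List.enumerate row.toList 0).filter (fun ic => ic.2 = 'H')).map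
      (fun ic => 1 <<< ic.1.toNat)).sum)

-- {pp: F(pp) for pp in states}
def tableB (states : List Nat) (F : Nat → List Int) : PySem.Dict Nat (List Int) :=
  states.foldl (fun d pp => d.insert pp (F pp)) PySem.Dict.empty

-- one row of the bottom-up sweep: the new per-pp tables built from the old table f
def stepB (states : List Nat) (f : PySem.Dict Nat (List Int)) (mask : Nat) :
    PySem.Dict Nat (List Int) :=
  tableB states (fun pp =>
    states.map (fun p =>
      ((PySem.List.max?
          (((states.zip (f.getD p [])).filter
              (fun cf => cf.1 &&& mask == 0 && cf.1 &&& p == 0 && cf.1 &&& pp == 0)).map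
            (fun cf => (PySem.Int.bitCount (cf.1 : Int) : Int) + cf.2))
          (fun v => v)).getD 0)))
    -- max(...) over a never-empty generator (state 0 always qualifies) and f[p] with p
    -- always a key of f: the .getD defaults are unreachable

def solve_easy_alt (n : Int) (m : Int) (grid : List String) : Int :=
  if n = 0 ∨ m = 0 then 0
  else
    let mountains := (PySem.List.slice grid none (some n)).map rowMaskB  -- grid[:n]
    let states := validStatesA m.toNat  -- Source B computes the same states comprehension
    let f0 := tableB states (fun _ => PySem.List.pyRepeat [0] (PySem.List.len states))
    PySem.List.pyGetD ((mountains.reverse.foldl (stepB states) f0).getD 0 []) 0 0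
    -- f[0][0]: 0 is always a key and the list is never empty

-- ===== PRECONDITION & SPEC =====
-- Pre_ excludes exactly the inputs where A raises: m < 0 with n ≠ 0 (ValueError from 1 << m),
-- n < 0 with m ≠ 0 (unbounded recursion, RecursionError), and 0 < n > len(grid) (IndexError).
def Pre_solve_easy (n : Int) (m : Int) (grid : List String) : Prop :=
  n = 0 ∨ m = 0 ∨ (0 < n ∧ 0 < m ∧ n ≤ (grid.length : Int))
instance (n : Int) (m : Int) (grid : List String) : Decidable (Pre_solve_easy n m grid) := by
  unfold Pre_solve_easy; infer_instance

def pvWitness_solve_easy : Int × Int × List String := (2, 3, ["H..", ".H."])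

def Spec_solve_easy (n : Int) (m : Int) (grid : List String) (out : Int) : Prop := out = solve_easy_alt n m grid
instance (n : Int) (m : Int) (grid : List String) (out : Int) : Decidable (Spec_solve_easy n m grid out) := by unfold Spec_solve_easy; infer_instance

-- ===== CLAIM (what is proved, stated in full; the proofs are below) =====
def Claim_equal_solve_easy : Prop := ∀ (n : Int) (m : Int) (grid : List String), Dom_solve_easy n m grid → Pre_solve_easy n m grid → Spec_solve_easy n m grid (solve_easy n m grid)

-- ===== LEMMAS AND PROOFS =====

-- proof-side reference: the recursion dfs computes, without the cache
def dfsA (valid : List Nat) : List Nat → Nat → Nat → Int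
  | [], _, _ => 0
  | mrow :: rest, st1, st2 =>
    valid.foldl (fun acc cur =>
      if cur &&& mrow ≠ 0 then acc
      else if cur &&& st1 ≠ 0 then acc
      else if cur &&& st2 ≠ 0 then acc
      else max acc ((PySem.Int.bitCount (cur : Int) : Int) + dfsA valid rest cur st1)) 0
termination_by l => l.length
decreasing_by simp

-- generic: a fold whose body never decreases the accumulator stays ≥ its start
theorem foldl_ge {α : Type} (l : List α) (g : Int → α → Int) (init : Int)
    (h : ∀ acc x, acc ≤ g acc x) : init ≤ l.foldl g init := by
  induction l generalizing init with
  | nil => simp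
  | cons x t ih => exact le_trans (h init x) (ih (g init x))

theorem dfsA_nonneg (valid rows : List Nat) (st1 st2 : Nat) :
    0 ≤ dfsA valid rows st1 st2 := by
  cases rows with
  | nil => simp [dfsA]
  | cons mrow rest =>
    rw [dfsA]
    apply foldl_ge
    intro acc cur
    split_ifs <;> simp

theorem zero_mem_validStatesA (k : Nat) : 0 ∈ validStatesA k := by
  simp [validStatesA, List.mem_filter, List.mem_range]

-- the states list starts with state 0
theorem validStatesA_cons (k : Nat) : ∃ t, validStatesA k = 0 :: t := by
  unfold validStatesA
  rw [show (2 ^ k) = (2 ^ k - 1) + 1 from (Nat.sub_add_cancel Nat.one_le_two_pow).symm,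
    List.range_succ_eq_map]
  simp

-- ----- A side: the memoized dfs computes the reference recursion -----

-- every cached value is the reference value of the suffix its length names
def MemoInv (valid R : List Nat) (memo : Std.HashMap (Nat × Nat × Nat) Int) : Prop :=
  ∀ l s1 s2 v, memo[((l : Nat), (s1 : Nat), (s2 : Nat))]? = some v →
    v = dfsA valid (R.drop (R.length - l)) s1 s2

theorem suffix_drop {s R : List Nat} (h : s <:+ R) : R.drop (R.length - s.length) = s := by
  obtain ⟨t, rfl⟩ := h
  simp

theorem memoInv_insert (valid R rows : List Nat) (s1 s2 : Nat)
    (memo : Std.HashMap (Nat × Nat × Nat) Int) (hrows : rows <:+ R)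
    (hinv : MemoInv valid R memo) :
    MemoInv valid R (memo.insert (rows.length, s1, s2) (dfsA valid rows s1 s2)) := by
  intro l t1 t2 v hv
  rw [Std.HashMap.getElem?_insert] at hv
  by_cases he : ((rows.length, s1, s2) : Nat × Nat × Nat) = (l, t1, t2)
  · obtain ⟨h1, h2, h3⟩ : rows.length = l ∧ s1 = t1 ∧ s2 = t2 := by
      exact ⟨congrArg (·.1) he, congrArg (·.2.1) he, congrArg (·.2.2) he⟩
    subst h1; subst h2; subst h3
    simp at hv
    rw [← hv, suffix_drop hrows]
  · rw [if_neg (by simpa using he)] at hv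
    exact hinv l t1 t2 v hv

theorem dfsM_correct (valid R : List Nat) : ∀ (rows : List Nat), rows <:+ R →
    ∀ (s1 s2 : Nat) (memo : Std.HashMap (Nat × Nat × Nat) Int), MemoInv valid R memo →
      (dfsM valid rows s1 s2 memo).1 = dfsA valid rows s1 s2 ∧
        MemoInv valid R (dfsM valid rows s1 s2 memo).2 := by
  intro rows
  induction rows with
  | nil =>
    intro _ s1 s2 memo hinv
    rw [dfsM]
    cases hq : memo[((List.length ([] : List Nat), s1, s2) : Nat × Nat × Nat)]? with
    | some v =>
      refine ⟨?_, hinv⟩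
      have hvv := hinv _ s1 s2 v (by simpa using hq)
      rw [hvv]
      simp [List.drop_length, dfsA]
    | none =>
      refine ⟨by simp [dfsA], ?_⟩
      have := memoInv_insert valid R [] s1 s2 memo (List.nil_suffix (l := R)) hinv
      simpa [dfsA] using this
  | cons mrow rest ih =>
    intro hsfx s1 s2 memo hinv
    have hrest : rest <:+ R := (List.suffix_cons mrow rest).trans hsfx
    rw [dfsM]
    cases hq : memo[((List.length (mrow :: rest), s1, s2) : Nat × Nat × Nat)]? with
    | some v =>
      refine ⟨?_, hinv⟩
      have hvv := hinv _ s1 s2 v (by simpa using hq)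
      rw [hvv, show R.length - (rest.length + 1) = R.length - (mrow :: rest).length from by
        simp, suffix_drop hsfx]
    | none =>
      -- the fold threads (running max, memo); relate it to the pure fold
      have hfold : ∀ (vs : List Nat) (a : Int)
          (mm : Std.HashMap (Nat × Nat × Nat) Int), MemoInv valid R mm →
          (vs.foldl
              (fun (acc : Int × Std.HashMap (Nat × Nat × Nat) Int) cur =>
                if cur &&& mrow ≠ 0 then acc
                else if cur &&& s1 ≠ 0 then acc
                else if cur &&& s2 ≠ 0 then acc
                else
                  let q := dfsM valid rest cur s1 acc.2
                  (max acc.1 ((PySem.Int.bitCount (cur : Int) : Int) + q.1), q.2))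
              (a, mm)).1 =
            vs.foldl
              (fun acc cur =>
                if cur &&& mrow ≠ 0 then acc
                else if cur &&& s1 ≠ 0 then acc
                else if cur &&& s2 ≠ 0 then acc
                else max acc ((PySem.Int.bitCount (cur : Int) : Int) + dfsA valid rest cur s1))
              a ∧
            MemoInv valid R
              (vs.foldl
                (fun (acc : Int × Std.HashMap (Nat × Nat × Nat) Int) cur =>
                  if cur &&& mrow ≠ 0 then acc
                  else if cur &&& s1 ≠ 0 then acc
                  else if cur &&& s2 ≠ 0 then acc
                  else
                    let q := dfsM valid rest cur s1 acc.2
                    (max acc.1 ((PySem.Int.bitCount (cur : Int) : Int) + q.1), q.2))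
                (a, mm)).2 := by
        intro vs
        induction vs with
        | nil => intro a mm hmm; exact ⟨rfl, hmm⟩
        | cons cur vt ihv =>
          intro a mm hmm
          by_cases c1 : cur &&& mrow ≠ 0
          · simpa [c1] using ihv a mm hmm
          · by_cases c2 : cur &&& s1 ≠ 0
            · simpa [c1, c2] using ihv a mm hmm
            · by_cases c3 : cur &&& s2 ≠ 0
              · simpa [c1, c2, c3] using ihv a mm hmm
              · obtain ⟨hq1, hq2⟩ := ih hrest cur s1 mm hmm
                simp only [List.foldl_cons, if_neg c1, if_neg c2, if_neg c3]
                rw [show (dfsM valid rest cur s1 mm).1 = dfsA valid rest cur s1 from hq1]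
                exact ihv _ _ hq2
      obtain ⟨hq1, hq2⟩ := hfold valid 0 memo hinv
      have hda : dfsA valid (mrow :: rest) s1 s2 = valid.foldl
          (fun acc cur =>
            if cur &&& mrow ≠ 0 then acc
            else if cur &&& s1 ≠ 0 then acc
            else if cur &&& s2 ≠ 0 then acc
            else max acc ((PySem.Int.bitCount (cur : Int) : Int) + dfsA valid rest cur s1))
          0 := by rw [dfsA]
      have hfe := hq1.trans hda.symm
      have hgoal := memoInv_insert valid R (mrow :: rest) s1 s2 _ hsfx hq2
      rw [← hfe] at hgoal
      constructor
      · simpa using hfe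
      · simpa using hgoal

-- ----- B side: the tabulation computes the reference recursion -----

-- t.foldl max (max a b) = max a (t.foldl max b)
theorem foldl_max_init (t : List Int) : ∀ a b : Int,
    t.foldl max (max a b) = max a (t.foldl max b) := by
  induction t with
  | nil => intro a b; simp
  | cons c t ih =>
    intro a b
    simp only [List.foldl_cons, max_assoc, ih]

-- Python's max over a nonempty list with a nonnegative member equals the 0-seeded running max
theorem max_getD_eq_foldl (l : List Int) (h : ∃ y ∈ l, 0 ≤ y) :
    (PySem.List.max? l (fun v => v)).getD 0 = l.foldl max 0 := by
  cases l with
  | nil => simp at h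
  | cons x t =>
    rw [PySem.List.max?_id_cons]
    simp only [Option.getD_some, List.foldl_cons]
    have h0 : 0 ≤ t.foldl max x := by
      obtain ⟨y, hy, hy0⟩ := h
      rcases List.mem_cons.mp hy with rfl | hyt
      · exact le_trans hy0 (PySem.List.le_foldl_max t y).1
      · exact le_trans hy0 ((PySem.List.le_foldl_max t x).2 y hyt)
    rw [show t.foldl max (max 0 x) = max 0 (t.foldl max x) from foldl_max_init t 0 x]
    exact (max_eq_right h0).symm

-- lookup in the dict comprehension over states
theorem tableB_getD (F : Nat → List Int) (q : Nat) (d0 : List Int) :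
    ∀ (outer : List Nat) (d : PySem.Dict Nat (List Int)),
      (outer.foldl (fun d pp => d.insert pp (F pp)) d).getD q d0 =
        if q ∈ outer then F q else d.getD q d0 := by
  intro outer
  induction outer with
  | nil => intro d; simp
  | cons s t ih =>
    intro d
    simp only [List.foldl_cons, ih, List.mem_cons]
    rw [PySem.Dict.getD_insert]
    by_cases h1 : q ∈ t
    · simp [h1]
    · by_cases h2 : q = s
      · subst h2; simp
      · simp [h1, h2]

theorem tableB_getD' (states : List Nat) (F : Nat → List Int) (q : Nat) (d0 : List Int)
    (hq : q ∈ states) : (tableB states F).getD q d0 = F q := by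
  unfold tableB
  rw [tableB_getD F q d0 states]
  simp [hq]

-- one bottom-up row step computes one unfolding of the reference recursion
theorem stepB_getD (states : List Nat) (f : PySem.Dict Nat (List Int)) (mask : Nat)
    (rest : List Nat) (pp : Nat) (h0 : 0 ∈ states) (hpp : pp ∈ states)
    (hf : ∀ p ∈ states, f.getD p [] = states.map (fun c => dfsA states rest c p)) :
    (stepB states f mask).getD pp [] =
      states.map (fun p => dfsA states (mask :: rest) p pp) := by
  unfold stepB
  rw [tableB_getD' states _ pp [] hpp]
  apply List.map_congr_left
  intro p hp
  rw [hf p hp]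
  rw [show states.zip (states.map (fun c => dfsA states rest c p)) =
      states.map (fun c => (c, dfsA states rest c p)) from
    List.map_prod_left_eq_zip.symm]
  rw [List.filter_map, List.map_map]
  rw [dfsA]
  have hbody : states.foldl
      (fun acc cur =>
        if cur &&& mask ≠ 0 then acc
        else if cur &&& p ≠ 0 then acc
        else if cur &&& pp ≠ 0 then acc
        else max acc ((PySem.Int.bitCount (cur : Int) : Int) + dfsA states rest cur p)) 0 =
      states.foldl
        (fun acc cur =>
          if (cur &&& mask == 0 && cur &&& p == 0 && cur &&& pp == 0) then
            max acc ((PySem.Int.bitCount ((cur : Nat) : Int) : Int) + dfsA states rest cur p)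
          else acc) 0 := by
    apply PySem.List.foldl_congr_mem
    intro acc cur _
    by_cases c1 : cur &&& mask = 0 <;> by_cases c2 : cur &&& p = 0 <;>
      by_cases c3 : cur &&& pp = 0 <;> simp [c1, c2, c3]
  rw [hbody, PySem.List.foldl_if_eq_foldl_filter]
  rw [max_getD_eq_foldl]
  · rw [List.foldl_map]
    rfl
  · refine ⟨(PySem.Int.bitCount ((0 : Nat) : Int) : Int) + dfsA states rest 0 p,
      List.mem_map_of_mem ?_, ?_⟩
    · rw [List.mem_filter]
      refine ⟨h0, ?_⟩
      simp [Nat.zero_and]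
    · have := dfsA_nonneg states rest 0 p
      positivity

-- the tabulation invariant: after sweeping the rows bottom-up, the table at pp lists,
-- per prev-state p, exactly the reference value on those rows
theorem dp_correct (states rows : List Nat) (h0 : 0 ∈ states) :
    ∀ pp, pp ∈ states →
      (rows.foldr (fun mrow f => stepB states f mrow)
          (tableB states (fun _ => PySem.List.pyRepeat [0] (PySem.List.len states)))).getD
          pp []
        = states.map (fun p => dfsA states rows p pp) := by
  induction rows with
  | nil =>
    intro pp hpp
    simp only [List.foldr_nil]
    rw [tableB_getD' states _ pp [] hpp]
    rw [PySem.List.pyRepeat_singleton]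
    simp [PySem.List.len_eq, dfsA, List.map_const']
  | cons mrow rest ih =>
    intro pp hpp
    simp only [List.foldr_cons]
    exact stepB_getD states _ mrow rest pp h0 hpp (fun p hp => ih p hp)

-- the two mask builders agree: or-ing a fresh high bit into a small accumulator is addition
theorem mask_fold_eq (cs : List Char) : ∀ (k : Nat) (acc : Nat), acc < 2 ^ k →
    (PySem.List.enumerate cs (k : Int)).foldl
        (fun mask ic => if ic.2 = 'H' then mask ||| (1 <<< ic.1.toNat) else mask) acc =
      acc + ((((PySem.List.enumerate cs (k : Int)).filter (fun ic => ic.2 = 'H')).map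
          (fun ic => 1 <<< ic.1.toNat)).sum) := by
  induction cs with
  | nil => intro k acc _; simp [PySem.List.enumerate_nil]
  | cons x t ih =>
    intro k acc hacc
    rw [PySem.List.enumerate_cons]
    have hk1 : ((k : Int) + 1) = ((k + 1 : Nat) : Int) := by push_cast; ring
    have htn : ((k : Int)).toNat = k := Int.toNat_natCast k
    by_cases hx : x = 'H'
    · simp only [List.foldl_cons, List.filter_cons, hx, decide_true, htn]
      rw [hk1]
      have hsh : (1 <<< k) = 2 ^ k := by simp [Nat.shiftLeft_eq]
      have hor : acc ||| (1 <<< k) = acc + 2 ^ k := by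
        rw [hsh]
        have h2p := Nat.two_pow_add_eq_or_of_lt hacc 1
        simp only [Nat.mul_one] at h2p
        rw [Nat.lor_comm, ← h2p, Nat.add_comm]
      rw [hor]
      simp only [if_true, List.map_cons, List.sum_cons]
      rw [ih (k + 1) (acc + 2 ^ k) (by rw [Nat.pow_succ]; omega)]
      rw [htn, hsh]
      omega
    · simp only [List.foldl_cons, List.filter_cons, if_neg hx]
      have hd : (decide (x = 'H')) = false := by simp [hx]
      rw [hd, hk1]
      simp only [Bool.false_eq_true, if_false]
      exact ih (k + 1) acc (lt_trans hacc (Nat.pow_lt_pow_succ (by norm_num)))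

theorem rowMask_eq (row : String) : rowMaskA row = rowMaskB row := by
  unfold rowMaskA rowMaskB
  have := mask_fold_eq row.toList 0 0 (by norm_num)
  simpa using this

-- ===== VERDICT (by name: the statement is the Claim_ definition above) =====
theorem solve_easy_spec : Claim_equal_solve_easy := by
  intro n m grid _ hpre
  unfold Spec_solve_easy solve_easy solve_easy_alt
  by_cases h : n = 0 ∨ m = 0
  · simp [h]
  · simp only [if_neg h]
    obtain ⟨hn, hm, hlen⟩ : 0 < n ∧ 0 < m ∧ n ≤ (grid.length : Int) := by
      rcases hpre with h1 | h1 | h1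
      · exact absurd (Or.inl h1) h
      · exact absurd (Or.inr h1) h
      · exact h1
    rw [PySem.List.slice_to grid (le_of_lt hn)]
    have hmaps : (grid.take n.toNat).map rowMaskB = (grid.map rowMaskA).take n.toNat := by
      rw [List.map_take]
      congr 1
      exact (List.map_congr_left (fun r _ => (rowMask_eq r).symm))
    rw [hmaps]
    rw [List.foldl_reverse]
    set states := validStatesA m.toNat with hst
    set rows := (grid.map rowMaskA).take n.toNat with hrows
    have h0 : 0 ∈ states := zero_mem_validStatesA m.toNat
    -- A side: the memoized dfs equals the reference recursion
    have ha : (dfsM states rows 0 0 ∅).1 = dfsA states rows 0 0 := by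
      refine (dfsM_correct states rows rows (List.suffix_refl rows) 0 0 ∅ ?_).1
      intro l s1 s2 v hv
      rw [Std.HashMap.getElem?_empty] at hv
      exact absurd hv (by simp)
    -- B side: the table at pp = 0 lists the reference values; its head is at p = 0
    have hb := dp_correct states rows h0 0 h0
    rw [ha, hb]
    obtain ⟨t, ht⟩ := validStatesA_cons m.toNat
    rw [← hst] at ht
    rw [ht]
    simp [PySem.List.pyGetD_zero_cons]
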